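-- pv_equiv track=rewrite | github.com/mohamedyassineabdi/UX-UI_-Agent | src/report/generate_audit_report.py | component_text
-- ===== SOURCE A (Python) =====
-- from typing import Any, Dict, Iterable, List, Optional
--
-- def clean_text(value: Any) -> str:
--     return " ".join(str(value or "").split()).strip()
--
-- def component_text(component: Dict[str, Any]) -> str:
--     bits = [
--         component.get("text"),
--         component.get("accessibleName"),
--         component.get("label"),
--         component.get("placeholder"),
--         component.get("name"),
--         component.get("href"),
--         component.get("semanticType"),
--         component.get("uxRole"),
--         component.get("className"),
--     ]
--     return clean_text(" ".join(clean_text(bit) for bit in bits if clean_text(bit)))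
-- ===== SOURCE B (Python) =====
-- def component_text(component):
--     keys = ("text", "accessibleName", "label", "placeholder", "name",
--             "href", "semanticType", "uxRole", "className")
--     raw = "\n".join(str(component.get(k) or "") for k in keys)
--     out = []
--     pending = False
--     for ch in raw:
--         if ch.isspace():
--             pending = True
--         else:
--             if pending and out:
--                 out.append(" ")
--             pending = False
--             out.append(ch)
--     return "".join(out)
-- ===== Notes on version B (the rewrite author's own statement) =====
-- stated objective: alternative
-- what changed: Replaces the split/filter/join/re-clean pipeline with one character-level streaming state machine: fields are concatenated with a whitespace separator and a single scan emits non-space characters, inserting one space before each word after the first, so no token lists are ever built.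
import Mathlib
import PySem

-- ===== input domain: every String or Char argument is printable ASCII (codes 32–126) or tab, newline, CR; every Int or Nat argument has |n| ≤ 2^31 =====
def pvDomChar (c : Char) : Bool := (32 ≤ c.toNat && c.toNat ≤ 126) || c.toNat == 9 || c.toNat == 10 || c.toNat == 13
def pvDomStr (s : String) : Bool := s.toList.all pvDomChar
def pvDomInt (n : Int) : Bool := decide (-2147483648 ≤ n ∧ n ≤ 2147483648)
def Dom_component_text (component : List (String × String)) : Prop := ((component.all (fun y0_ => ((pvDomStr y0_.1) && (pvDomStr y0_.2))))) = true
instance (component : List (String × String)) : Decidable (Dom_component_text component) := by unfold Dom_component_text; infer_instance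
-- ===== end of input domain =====

-- B replaces A's split/filter/join/re-clean pipeline by a single character-level
-- state machine over the fields joined with a whitespace separator (objective: alternative).

-- ===== PORT A =====
-- clean_text(value) for a string value: " ".join(str(value or "").split()).strip()
-- (str(s or "") = s for a string s, since str("") = "")
def pvClean (s : String) : String :=
  PySem.Str.strip (PySem.Str.join " " (PySem.Str.split₀ s))

def component_text (component : List (String × String)) : String :=
  let d := PySem.Dict.mk component
  let bits : List (Option String) :=
    [d.get? "text", d.get? "accessibleName", d.get? "label", d.get? "placeholder",
     d.get? "name", d.get? "href", d.get? "semanticType", d.get? "uxRole", d.get? "className"]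
  -- clean_text(bit) for bit : Optional[str]: str(bit or "") = bit.getD ""
  pvClean (PySem.Str.join " " ((bits.map (fun b => pvClean (b.getD ""))).filter (fun s => s != "")))

-- ===== PORT B =====
def pvKeys : List String :=
  ["text", "accessibleName", "label", "placeholder", "name",
   "href", "semanticType", "uxRole", "className"]

-- one loop iteration of Source B: st = (out, pending)
def pvNormStep (st : List Char × Bool) (c : Char) : List Char × Bool :=
  if PySem.Chars.isspace c then (st.1, true)
  else ((if st.2 && !st.1.isEmpty then st.1 ++ [' '] else st.1) ++ [c], false)

def component_text_alt (component : List (String × String)) : String :=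
  let d := PySem.Dict.mk component
  let raw := PySem.Str.join "\n" (pvKeys.map (fun k => (d.get? k).getD ""))
  String.ofList (raw.toList.foldl pvNormStep ([], false)).1

-- ===== PRECONDITION & SPEC =====
def Spec_component_text (component : List (String × String)) (out : String) : Prop := out = component_text_alt component
instance (component : List (String × String)) (out : String) : Decidable (Spec_component_text component out) := by unfold Spec_component_text; infer_instance

-- ===== CLAIM (what is proved, stated in full; the proofs are below) =====
def Claim_equal_component_text : Prop := ∀ (component : List (String × String)), Dom_component_text component → Spec_component_text component (component_text component)

-- ===== LEMMAS AND PROOFS =====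

-- a word produced by str.split(): nonempty and whitespace-free
def pvTok (t : List Char) : Prop := t ≠ [] ∧ ∀ c ∈ t, PySem.Chars.isspace c = false

theorem pv_join_single (sep t : List Char) : PySem.Chars.join sep [t] = t := by
  simp [PySem.Chars.join, List.intercalate, List.intersperse]

theorem pv_join_cons (sep t : List Char) (ts : List (List Char)) (h : ts ≠ []) :
    PySem.Chars.join sep (t :: ts) = t ++ sep ++ PySem.Chars.join sep ts := by
  cases ts with
  | nil => exact absurd rfl h
  | cons u us => simp [PySem.Chars.join, List.intercalate, List.intersperse]

theorem pv_join_ne_nil (ts : List (List Char)) (h : ∀ t ∈ ts, t ≠ []) (hne : ts ≠ []) :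
    PySem.Chars.join [' '] ts ≠ [] := by
  cases ts with
  | nil => exact absurd rfl hne
  | cons t us =>
    cases us with
    | nil => simpa [pv_join_single] using h t (by simp)
    | cons u vs =>
      rw [pv_join_cons [' '] t (u :: vs) (by simp)]
      have := h t (by simp)
      intro hc
      simp at hc

theorem pv_join_append (ls rs : List (List Char)) (hl : ls ≠ []) (hr : rs ≠ []) :
    PySem.Chars.join [' '] (ls ++ rs)
      = PySem.Chars.join [' '] ls ++ ' ' :: PySem.Chars.join [' '] rs := by
  induction ls with
  | nil => exact absurd rfl hl
  | cons t us ih =>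
    cases us with
    | nil => simp [pv_join_cons [' '] t rs hr]
    | cons u vs =>
      rw [List.cons_append, pv_join_cons [' '] t ((u :: vs) ++ rs) (by simp),
          pv_join_cons [' '] t (u :: vs) (by simp), ih (by simp)]
      simp

theorem pv_go_token (t : List Char) (h : ∀ c ∈ t, PySem.Chars.isspace c = false) :
    ∀ (s cur : List Char) (acc : List (List Char)),
      PySem.Chars.split₀.go (t ++ s) cur acc = PySem.Chars.split₀.go s (t.reverse ++ cur) acc := by
  induction t with
  | nil => intro s cur acc; simp
  | cons c t' ih =>
    intro s cur acc
    have hc := h c (by simp)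
    rw [List.cons_append, PySem.Chars.split₀.go]
    simp only [hc]
    rw [ih (fun x hx => h x (by simp [hx])) s (c :: cur) acc]
    simp

theorem pv_go_join (ts : List (List Char)) (h : ∀ t ∈ ts, pvTok t) :
    ∀ acc : List (List Char),
      PySem.Chars.split₀.go (PySem.Chars.join [' '] ts) [] acc = acc.reverse ++ ts := by
  induction ts with
  | nil => intro acc; simp [PySem.Chars.split₀.go, PySem.Chars.join, List.intercalate]
  | cons t us ih =>
    intro acc
    obtain ⟨hne, hws⟩ := h t (by simp)
    cases us with
    | nil =>
      rw [pv_join_single, show t = t ++ [] by simp, pv_go_token t hws [] [] acc,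
          PySem.Chars.split₀.go]
      simp [List.isEmpty_iff, hne]
    | cons u vs =>
      rw [pv_join_cons [' '] t (u :: vs) (by simp), List.append_assoc,
          pv_go_token t hws _ [] acc, List.singleton_append, PySem.Chars.split₀.go]
      have : PySem.Chars.isspace ' ' = true := by decide
      simp only [this, if_true, List.append_nil, List.isEmpty_iff,
        List.reverse_eq_nil_iff, hne, List.reverse_reverse]
      rw [if_neg not_false, ih (fun x hx => h x (by simp [hx])) (t :: acc)]
      simp

theorem pv_split₀_join (ts : List (List Char)) (h : ∀ t ∈ ts, pvTok t) :
    PySem.Chars.split₀ (PySem.Chars.join [' '] ts) = ts := by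
  rw [PySem.Chars.split₀, pv_go_join ts h []]
  simp

theorem pv_go_tok (s : List Char) :
    ∀ (cur : List Char) (acc : List (List Char)),
      (∀ t ∈ acc, pvTok t) → (∀ c ∈ cur, PySem.Chars.isspace c = false) →
      ∀ t ∈ PySem.Chars.split₀.go s cur acc, pvTok t := by
  induction s with
  | nil =>
    intro cur acc hacc hcur t ht
    rw [PySem.Chars.split₀.go] at ht
    split_ifs at ht with hemp
    · simp at ht; exact hacc t ht
    · simp at ht
      rcases ht with ht | rfl
      · exact hacc t ht
      · refine ⟨by simpa [List.isEmpty_iff] using hemp, ?_⟩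
        intro c hc; exact hcur c (by simpa using hc)
  | cons c rest ih =>
    intro cur acc hacc hcur t ht
    rw [PySem.Chars.split₀.go] at ht
    by_cases hc : PySem.Chars.isspace c = true
    · simp only [hc, if_true] at ht
      split_ifs at ht with hemp
      · exact ih [] acc hacc (by simp) t ht
      · refine ih [] (cur.reverse :: acc) ?_ (by simp) t ht
        intro u hu
        rcases List.mem_cons.mp hu with hu | hu
        · subst hu
          refine ⟨by simpa [List.isEmpty_iff] using hemp, ?_⟩
          intro x hx; exact hcur x (by simpa using hx)
        · exact hacc u hu
    · simp only [hc] at ht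
      refine ih (c :: cur) acc hacc ?_ t ht
      intro x hx
      rcases List.mem_cons.mp hx with hx | hx
      · subst hx; simpa using hc
      · exact hcur x hx

theorem pv_split₀_tok (s : List Char) : ∀ t ∈ PySem.Chars.split₀ s, pvTok t := by
  intro t ht
  exact pv_go_tok s [] [] (by simp) (by simp) t ht

theorem pv_strip_join (ts : List (List Char)) (h : ∀ t ∈ ts, pvTok t) :
    PySem.Chars.strip (PySem.Chars.join [' '] ts) = PySem.Chars.join [' '] ts := by
  cases hts : ts.reverse with
  | nil =>
    have : ts = [] := by simpa using congrArg List.reverse hts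
    subst this; rfl
  | cons t us =>
    have hts' : ts = us.reverse ++ [t] := by
      have := congrArg List.reverse hts; simpa using this
    obtain ⟨hne, hws⟩ := h t (by rw [hts']; simp)
    -- the whole joined list: either t alone, or join ++ ' ' :: t
    have key : ∃ pre, PySem.Chars.join [' '] ts = pre ++ t ∧
        (pre = [] ∨ ∃ pre', pre = pre' ++ [' ']) := by
      cases hus : us.reverse with
      | nil =>
        refine ⟨[], ?_, Or.inl rfl⟩
        rw [hts', hus]; simp
      | cons v ws =>
        refine ⟨PySem.Chars.join [' '] us.reverse ++ [' '], ?_, Or.inr ⟨_, rfl⟩⟩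
        rw [hts', pv_join_append us.reverse [t] (by simp [hus]) (by simp)]
        simp
    obtain ⟨pre, hpre, _⟩ := key
    -- rstrip is a no-op: last char is the last char of t, non-whitespace
    obtain ⟨c, t', hct⟩ : ∃ c t', t.reverse = c :: t' := by
      cases htr : t.reverse with
      | nil => exact absurd (by simpa using congrArg List.reverse htr) hne
      | cons c t' => exact ⟨c, t', rfl⟩
    have hcmem : c ∈ t := by
      have : c ∈ t.reverse := by rw [hct]; simp
      simpa using this
    -- first handle lstrip: the first char of the join is the first char of the FIRST token
    have lstrip_eq : PySem.Chars.lstrip (PySem.Chars.join [' '] ts) = PySem.Chars.join [' '] ts := by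
      cases ts with
      | nil => rfl
      | cons t0 us0 =>
        obtain ⟨hne0, hws0⟩ := h t0 (by simp)
        obtain ⟨c0, t0', hc0⟩ : ∃ c0 t0', t0 = c0 :: t0' := by
          cases t0 with
          | nil => exact absurd rfl hne0
          | cons c0 t0' => exact ⟨c0, t0', rfl⟩
        have hc0ws : PySem.Chars.isspace c0 = false := hws0 c0 (by rw [hc0]; simp)
        cases us0 with
        | nil => rw [pv_join_single, hc0]; simp [PySem.Chars.lstrip, hc0ws]
        | cons u0 vs0 =>
          rw [pv_join_cons [' '] t0 (u0 :: vs0) (by simp), hc0]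
          simp [PySem.Chars.lstrip, hc0ws]
    rw [PySem.Chars.strip, lstrip_eq, PySem.Chars.rstrip, hpre]
    have : (pre ++ t).reverse = c :: (t' ++ pre.reverse) := by
      rw [List.reverse_append, hct]; simp
    rw [this, List.dropWhile_cons]
    simp only [hws c hcmem]
    simp [← this]

-- clean_text on a string is just " ".join(s.split())
theorem pv_clean_eq (s : String) :
    pvClean s = PySem.Str.join " " (PySem.Str.split₀ s) := by
  have h1 : (PySem.Str.join " " (PySem.Str.split₀ s)).toList
      = PySem.Chars.join [' '] (PySem.Chars.split₀ s.toList) := by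
    rw [PySem.Str.toList_join, PySem.Str.split₀_map_toList]; rfl
  have : (pvClean s).toList = (PySem.Str.join " " (PySem.Str.split₀ s)).toList := by
    rw [pvClean, PySem.Str.toList_strip, h1,
        pv_strip_join _ (pv_split₀_tok s.toList), ← h1]
  calc pvClean s = String.ofList (pvClean s).toList := by simp
    _ = String.ofList (PySem.Str.join " " (PySem.Str.split₀ s)).toList := congrArg String.ofList this
    _ = _ := String.ofList_toList

theorem pv_join_map_join (tss : List (List (List Char))) (h : ∀ l ∈ tss, l ≠ []) :
    PySem.Chars.join [' '] (tss.map (PySem.Chars.join [' ']))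
      = PySem.Chars.join [' '] tss.flatten := by
  induction tss with
  | nil => rfl
  | cons l us ih =>
    cases us with
    | nil => simp
    | cons u vs =>
      have hl : l ≠ [] := h l (by simp)
      have hflat : (u :: vs).flatten ≠ [] := by
        have hu : u ≠ [] := h u (by simp)
        cases u with
        | nil => exact absurd rfl hu
        | cons a b => simp
      rw [List.map_cons, pv_join_cons [' '] _ _ (by simp), ih (fun x hx => h x (by simp [hx]))]
      simp only [List.flatten_cons]
      rw [pv_join_append l (u ++ vs.flatten) hl hflat]
      simp

theorem pv_ne_empty (s : String) : (s != "") = !s.toList.isEmpty := by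
  by_cases h : s.toList = []
  · have hs : s = "" := by rw [← String.ofList_toList (s := s), h]
    subst hs; simp
  · have hs : s ≠ "" := fun hc => h (by simp [hc])
    have h1 : (s != "") = true := by simp [hs]
    have h2 : (!s.toList.isEmpty) = true := by simp [h]
    rw [h1, h2]

theorem pv_map_toList_filter (xs : List String) :
    (xs.filter (fun s => s != "")).map String.toList
      = (xs.map String.toList).filter (fun l => !l.isEmpty) := by
  induction xs with
  | nil => rfl
  | cons s xs ih =>
    simp only [List.map_cons, List.filter_cons, ← pv_ne_empty]
    cases h : (s != "") <;> simp [ih]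

theorem pv_flatten_filter {α : Type} (tss : List (List α)) :
    (tss.filter (fun l => !l.isEmpty)).flatten = tss.flatten := by
  induction tss with
  | nil => rfl
  | cons l us ih =>
    cases l with
    | nil => simpa using ih
    | cons a b => simp [ih]

-- ===== B-side lemmas: the state machine computes " ".join(split₀ s) =====

-- split₀.go with a non-empty accumulator just prepends the finished tokens
theorem pv_go_acc (s : List Char) :
    ∀ (cur : List Char) (acc : List (List Char)),
      PySem.Chars.split₀.go s cur acc = acc.reverse ++ PySem.Chars.split₀.go s cur [] := by
  induction s with
  | nil =>
    intro cur acc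
    rw [PySem.Chars.split₀.go, PySem.Chars.split₀.go]
    by_cases h : cur.isEmpty <;> simp [h]
  | cons c rest ih =>
    intro cur acc
    rw [PySem.Chars.split₀.go]
    conv_rhs => rw [PySem.Chars.split₀.go]
    by_cases hc : PySem.Chars.isspace c = true
    · rw [if_pos hc, if_pos hc]
      by_cases h : cur.isEmpty = true
      · rw [if_pos h, if_pos h]
        exact ih [] acc
      · rw [if_neg h, if_neg h, ih [] (cur.reverse :: acc), ih [] [cur.reverse]]
        simp
    · rw [if_neg hc, if_neg hc]
      exact ih (c :: cur) acc

-- a whitespace character inside the text splits the token stream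
theorem pv_go_break (c : Char) (hc : PySem.Chars.isspace c = true) (y : List Char) :
    ∀ (x cur : List Char) (acc : List (List Char)),
      PySem.Chars.split₀.go (x ++ c :: y) cur acc
        = PySem.Chars.split₀.go x cur acc ++ PySem.Chars.split₀ y := by
  intro x
  induction x with
  | nil =>
    intro cur acc
    rw [List.nil_append]
    conv_lhs => rw [PySem.Chars.split₀.go]
    conv_rhs => rw [PySem.Chars.split₀.go]
    rw [if_pos hc]
    by_cases h : cur.isEmpty = true
    · rw [if_pos h, if_pos h, pv_go_acc y [] acc]
      rfl
    · rw [if_neg h, if_neg h, pv_go_acc y [] (cur.reverse :: acc)]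
      rfl
  | cons a x' ih =>
    intro cur acc
    rw [List.cons_append, PySem.Chars.split₀.go]
    conv_rhs => rw [PySem.Chars.split₀.go]
    by_cases ha : PySem.Chars.isspace a = true
    · rw [if_pos ha, if_pos ha]
      by_cases h : cur.isEmpty = true
      · rw [if_pos h, if_pos h]; exact ih [] acc
      · rw [if_neg h, if_neg h]; exact ih [] (cur.reverse :: acc)
    · rw [if_neg ha, if_neg ha]; exact ih (a :: cur) acc

-- splitting fields joined by '\n' = concatenating each field's tokens
theorem pv_split_join_fields (fields : List (List Char)) :
    PySem.Chars.split₀ (PySem.Chars.join ['\n'] fields)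
      = (fields.map PySem.Chars.split₀).flatten := by
  induction fields with
  | nil => rfl
  | cons f fs ih =>
    cases fs with
    | nil => simp
    | cons g gs =>
      rw [pv_join_cons ['\n'] f (g :: gs) (by simp), List.append_assoc, List.singleton_append,
          PySem.Chars.split₀, pv_go_break '\n' (by decide) _ f [] []]
      rw [List.map_cons, List.flatten_cons, ← ih]
      rfl

-- the emitted output of Source B's loop, as a function of the finished tokens and the current word
def pvEmit (acc : List (List Char)) (cur : List Char) : List Char :=
  PySem.Chars.join [' '] (acc.reverse ++ (if cur.isEmpty then [] else [cur.reverse]))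

theorem pv_emit_flush (acc : List (List Char)) (cur : List Char) (h : cur.isEmpty = false) :
    pvEmit acc cur = pvEmit (cur.reverse :: acc) [] := by
  simp [pvEmit, h]

theorem pv_join_last_snoc (ls : List (List Char)) (t : List Char) (c : Char) :
    PySem.Chars.join [' '] (ls ++ [t]) ++ [c] = PySem.Chars.join [' '] (ls ++ [t ++ [c]]) := by
  cases ls with
  | nil => simp
  | cons l us =>
    rw [pv_join_append (l :: us) [t] (by simp) (by simp),
        pv_join_append (l :: us) [t ++ [c]] (by simp) (by simp)]
    simp

-- one non-space character extends the emitted output by exactly that character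
theorem pv_emit_extend (acc : List (List Char)) (cur : List Char) (pending : Bool) (c : Char)
    (hacc : ∀ t ∈ acc, pvTok t)
    (h1 : cur.isEmpty = true → (acc = [] ∨ pending = true))
    (h2 : cur.isEmpty = false → pending = false) :
    (if pending && !(pvEmit acc cur).isEmpty then pvEmit acc cur ++ [' '] else pvEmit acc cur) ++ [c]
      = pvEmit acc (c :: cur) := by
  by_cases hcur : cur.isEmpty
  · have hc' : cur = [] := List.isEmpty_iff.mp hcur
    subst hc'
    rcases h1 rfl with hA | hP
    · subst hA
      simp [pvEmit, PySem.Chars.join, List.intercalate]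
    · cases acc with
      | nil => simp [pvEmit, PySem.Chars.join, List.intercalate]
      | cons a as =>
        have hout : pvEmit (a :: as) [] = PySem.Chars.join [' '] (a :: as).reverse := by
          simp [pvEmit]
        have hne : PySem.Chars.join [' '] (a :: as).reverse ≠ [] := by
          refine pv_join_ne_nil _ ?_ (by simp)
          intro t ht
          exact (hacc t (List.mem_reverse.mp ht)).1
        rw [hout, hP]
        simp only [Bool.true_and, List.isEmpty_eq_false_iff.mpr hne, Bool.not_false, if_true]
        have : pvEmit (a :: as) [c] = PySem.Chars.join [' '] ((a :: as).reverse ++ [[c]]) := by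
          simp [pvEmit]
        rw [this, pv_join_append _ [[c]] (by simp) (by simp), pv_join_single]
        simp
  · have hp := h2 (by simpa using hcur)
    subst hp
    simp only [Bool.false_and, Bool.false_eq_true, if_false]
    have h3 : pvEmit acc cur = PySem.Chars.join [' '] (acc.reverse ++ [cur.reverse]) := by
      simp [pvEmit, hcur]
    have h4 : pvEmit acc (c :: cur) = PySem.Chars.join [' '] (acc.reverse ++ [cur.reverse ++ [c]]) := by
      simp [pvEmit]
    rw [h3, h4, pv_join_last_snoc]

-- the loop of Source B, run from a mid-scan state, produces the single-space join of split₀.go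
theorem pv_sm_go (s : List Char) :
    ∀ (cur : List Char) (acc : List (List Char)) (pending : Bool),
      (∀ t ∈ acc, pvTok t) → (∀ ch ∈ cur, PySem.Chars.isspace ch = false) →
      (cur.isEmpty = true → (acc = [] ∨ pending = true)) →
      (cur.isEmpty = false → pending = false) →
      (s.foldl pvNormStep (pvEmit acc cur, pending)).1
        = PySem.Chars.join [' '] (PySem.Chars.split₀.go s cur acc) := by
  induction s with
  | nil =>
    intro cur acc pending _ _ _ _
    rw [List.foldl_nil, PySem.Chars.split₀.go]
    by_cases h : cur.isEmpty
    · simp [pvEmit, h]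
    · simp [pvEmit, h]
  | cons c rest ih =>
    intro cur acc pending hacc hcur h1 h2
    rw [List.foldl_cons, PySem.Chars.split₀.go]
    by_cases hc : PySem.Chars.isspace c
    · have hstep : pvNormStep (pvEmit acc cur, pending) c = (pvEmit acc cur, true) := by
        simp [pvNormStep, hc]
      rw [hstep]
      by_cases h : cur.isEmpty
      · have hc' : cur = [] := List.isEmpty_iff.mp h
        subst hc'
        simp only [hc, if_true, List.isEmpty_nil, if_true]
        exact ih [] acc true hacc (by simp) (fun _ => Or.inr rfl) (by simp)
      · simp only [hc, if_true, h]
        rw [pv_emit_flush acc cur (by simpa using h)]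
        refine ih [] (cur.reverse :: acc) true ?_ (by simp) (fun _ => Or.inr rfl) (by simp)
        intro t ht
        rcases List.mem_cons.mp ht with rfl | ht
        · exact ⟨by simpa [List.isEmpty_iff] using h, fun x hx => hcur x (by simpa using hx)⟩
        · exact hacc t ht
    · have hstep : pvNormStep (pvEmit acc cur, pending) c
          = (pvEmit acc (c :: cur), false) := by
        rw [pvNormStep, if_neg hc]
        exact Prod.ext (pv_emit_extend acc cur pending c hacc h1 h2) rfl
      rw [hstep]
      simp only [hc]
      refine ih (c :: cur) acc false hacc ?_ (by simp) (fun _ => rfl)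
      intro x hx
      rcases List.mem_cons.mp hx with rfl | hx
      · simpa using hc
      · exact hcur x hx

theorem pv_sm_eq_join_split (s : List Char) :
    (s.foldl pvNormStep ([], false)).1 = PySem.Chars.join [' '] (PySem.Chars.split₀ s) := by
  have h0 : pvEmit [] [] = [] := rfl
  rw [PySem.Chars.split₀, ← h0]
  exact pv_sm_go s [] [] false (by simp) (by simp) (fun _ => Or.inl rfl) (by simp)

-- ===== VERDICT (by name: the statement is the Claim_ definition above) =====
set_option maxHeartbeats 1000000 in
theorem component_text_spec : Claim_equal_component_text := by
  intro component _
  unfold Spec_component_text component_text component_text_alt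
  set d := PySem.Dict.mk component with hd
  set bits : List (Option String) :=
    [d.get? "text", d.get? "accessibleName", d.get? "label", d.get? "placeholder",
     d.get? "name", d.get? "href", d.get? "semanticType", d.get? "uxRole", d.get? "className"]
    with hbits
  -- token lists per field
  set tss : List (List (List Char)) :=
    bits.map (fun b => PySem.Chars.split₀ (b.getD "").toList) with htss
  have htok : ∀ l ∈ tss, ∀ t ∈ l, pvTok t := by
    intro l hl
    rw [htss] at hl
    obtain ⟨b, _, rfl⟩ := List.mem_map.mp hl
    exact pv_split₀_tok _
  -- B side: the state machine output is the join of all tokens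
  have hB : (String.ofList ((PySem.Str.join "\n"
      (pvKeys.map (fun k => (d.get? k).getD ""))).toList.foldl pvNormStep ([], false)).1).toList
      = PySem.Chars.join [' '] tss.flatten := by
    rw [String.toList_ofList, pv_sm_eq_join_split, PySem.Str.toList_join]
    have hsep : ("\n" : String).toList = ['\n'] := rfl
    rw [hsep, pv_split_join_fields]
    refine congrArg (fun l : List (List (List Char)) => PySem.Chars.join [' '] l.flatten) ?_
    simp only [htss, hbits, pvKeys, List.map_cons, List.map_nil]
  -- A side
  have hA : (pvClean (PySem.Str.join " "
      ((bits.map (fun b => pvClean (b.getD ""))).filter (fun s => s != "")))).toList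
      = PySem.Chars.join [' '] tss.flatten := by
    rw [pv_clean_eq, PySem.Str.toList_join, PySem.Str.split₀_map_toList, PySem.Str.toList_join]
    simp only [show (" " : String).toList = [' '] from rfl]
    -- the filtered cleaned strings, at the char level
    have hmapclean : ∀ b : Option String,
        (pvClean (b.getD "")).toList
          = PySem.Chars.join [' '] (PySem.Chars.split₀ (b.getD "").toList) := by
      intro b
      rw [pv_clean_eq, PySem.Str.toList_join, PySem.Str.split₀_map_toList]
      rfl
    have hfilteq : (((bits.map (fun b => pvClean (b.getD ""))).filter (fun s => s != "")).map String.toList)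
        = (tss.map (PySem.Chars.join [' '])).filter (fun l => !l.isEmpty) := by
      rw [pv_map_toList_filter, htss, List.map_map, List.map_map]
      exact congrArg (fun l => l.filter (fun t => !t.isEmpty))
        (List.map_congr_left (fun b _ => hmapclean b))
    rw [hfilteq]
    -- filtered joins are joins of the filtered (nonempty) token lists
    have hfj : (tss.map (PySem.Chars.join [' '])).filter (fun l => !l.isEmpty)
        = (tss.filter (fun l => !l.isEmpty)).map (PySem.Chars.join [' ']) := by
      rw [List.filter_map]
      refine congrArg (List.map (PySem.Chars.join [' '])) ?_
      apply List.filter_congr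
      intro l hl
      show (!(PySem.Chars.join [' '] l).isEmpty) = !l.isEmpty
      by_cases hl0 : l = []
      · subst hl0; rfl
      · have h1 := pv_join_ne_nil l (fun t ht => (htok l hl t ht).1) hl0
        rw [List.isEmpty_eq_false_iff.mpr h1, List.isEmpty_eq_false_iff.mpr hl0]
    rw [hfj]
    have hnef : ∀ l ∈ tss.filter (fun l => !l.isEmpty), l ≠ [] := by
      intro l hl
      simpa [List.isEmpty_iff] using (List.mem_filter.mp hl).2
    have htokf : ∀ t ∈ (tss.filter (fun l => !l.isEmpty)).flatten, pvTok t := by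
      intro t ht
      obtain ⟨l, hl, htl⟩ := List.mem_flatten.mp ht
      exact htok l (List.mem_of_mem_filter hl) t htl
    rw [pv_join_map_join _ hnef, pv_split₀_join _ htokf, pv_flatten_filter]
  calc pvClean (PySem.Str.join " "
      ((bits.map (fun b => pvClean (b.getD ""))).filter (fun s => s != "")))
      = String.ofList (pvClean (PySem.Str.join " "
        ((bits.map (fun b => pvClean (b.getD ""))).filter (fun s => s != "")))).toList :=
          String.ofList_toList.symm
    _ = String.ofList (String.ofList ((PySem.Str.join "\n"
        (pvKeys.map (fun k => (d.get? k).getD ""))).toList.foldl pvNormStep ([], false)).1).toList := by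
          rw [hA, hB]
    _ = _ := String.ofList_toList
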